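-- pv_equiv track=rewrite | github.com/l1Bort/04-Functions | 28.py | f
-- ===== SOURCE A (Python) =====
-- def f(liczba):
--     liczba_str = str(liczba)
--     suma = 0
--     for cyfra in set(liczba_str):
--         ile_razy = liczba_str.count(cyfra)
--         if ile_razy > 1:
--             suma += ile_razy * int(cyfra)
--     return suma
-- ===== SOURCE B (Python) =====
-- def f(liczba):
--     # sort the characters once, then scan consecutive equal runs in a single pass
--     s = sorted(str(liczba))
--     total = 0
--     cur = s[0]
--     n = 1
--     for ch in s[1:]:
--         if ch == cur:
--             n += 1
--         else:
--             if n > 1: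
--                 total += n * int(cur)
--             cur = ch
--             n = 1
--     if n > 1:
--         total += n * int(cur)
--     return total
-- ===== Notes on version B (the rewrite author's own statement) =====
-- stated objective: alternative
-- what changed: Instead of taking the set of distinct characters and re-scanning the whole string with .count for each, B sorts the characters once and walks consecutive equal runs in a single pass, adding run_length*digit for runs longer than 1.
import Mathlib
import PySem

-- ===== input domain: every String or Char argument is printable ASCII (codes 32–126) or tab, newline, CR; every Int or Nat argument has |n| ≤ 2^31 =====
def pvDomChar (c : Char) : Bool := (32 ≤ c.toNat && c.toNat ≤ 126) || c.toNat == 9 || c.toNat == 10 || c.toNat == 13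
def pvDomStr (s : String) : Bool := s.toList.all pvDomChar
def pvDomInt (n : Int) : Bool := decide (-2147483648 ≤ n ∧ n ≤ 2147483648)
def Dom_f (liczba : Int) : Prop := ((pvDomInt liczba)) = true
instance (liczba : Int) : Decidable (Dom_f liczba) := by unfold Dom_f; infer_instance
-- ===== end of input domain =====

-- B replaces "set of distinct chars + a full .count rescan per char" by sorting the chars
-- once and scanning consecutive equal runs in a single pass (alternative decomposition).

-- ===== PORT A =====
-- int(cyfra): exact here — the branch only runs when cyfra repeats in str(liczba),
-- and only digit characters can repeat there, so ofChars? is always `some`.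
def digitVal (c : Char) : Int := (PySem.Int.ofChars? [c]).getD 0

def f (liczba : Int) : Int :=
  let s := PySem.Int.toChars liczba
  (PySem.Set.ofList s).foldl
    (fun suma cyfra =>
      let ile : Int := (s.count cyfra : Int)
      if ile > 1 then suma + ile * digitVal cyfra else suma) 0

-- ===== PORT B =====
-- the one-pass run scan: cur = current char, n = length of its run so far
def fAltGo : Char → Nat → List Char → Int
  | c, n, [] => if 1 < n then (n : Int) * digitVal c else 0
  | c, n, d :: ds =>
    if d == c then fAltGo c (n + 1) ds
    else (if 1 < n then (n : Int) * digitVal c else 0) + fAltGo d 1 ds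

def f_alt (liczba : Int) : Int :=
  match PySem.List.sorted (PySem.Int.toChars liczba) (fun x => x) false with
  | [] => 0
  | c :: t => fAltGo c 1 t

-- ===== PRECONDITION & SPEC =====
def Spec_f (liczba : Int) (out : Int) : Prop := out = f_alt liczba
instance (liczba : Int) (out : Int) : Decidable (Spec_f liczba out) := by unfold Spec_f; infer_instance

-- ===== CLAIM (what is proved, stated in full; the proofs are below) =====
def Claim_equal_f : Prop := ∀ (liczba : Int), Dom_f liczba → Spec_f liczba (f liczba)

-- ===== LEMMAS AND PROOFS =====
-- contribution of one distinct char d with multiplicity m (the common summand of both sides)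
def contrib (c : Char) (m : Nat) : Int := if 1 < m then (m : Int) * digitVal c else 0

-- B's run scan over a sorted tail computes the per-distinct-char contribution sum
theorem fAltGo_eq (t : List Char) : ∀ (c : Char) (n : Nat),
    (c :: t).Pairwise (fun a b => a ≤ b) →
    fAltGo c n t = contrib c (n + t.count c) + ∑ d ∈ t.toFinset.erase c, contrib d (t.count d) := by
  induction t with
  | nil => intro c n _; simp [fAltGo, contrib]
  | cons d ds ih =>
    intro c n hp
    by_cases hdc : d = c
    · subst hdc
      rw [show fAltGo d n (d :: ds) = fAltGo d (n + 1) ds from by simp [fAltGo]]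
      rw [ih d (n + 1) hp.tail]
      have hcount : (d :: ds).count d = 1 + ds.count d := by simp; omega
      have hfs : (d :: ds).toFinset.erase d = ds.toFinset.erase d := by
        simp [List.toFinset_cons, Finset.erase_insert_eq_erase]
      rw [hcount, hfs, ← Nat.add_assoc]
      congr 1
      apply Finset.sum_congr rfl
      intro e he
      have hne : e ≠ d := Finset.ne_of_mem_erase he
      simp [hne.symm]
    · have hstep : fAltGo c n (d :: ds) = contrib c n + fAltGo d 1 ds := by
        simp [fAltGo, hdc, contrib]
      have hcd : c < d := lt_of_le_of_ne (List.rel_of_pairwise_cons hp (by simp)) (Ne.symm hdc)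
      have hds : ∀ x ∈ ds, d ≤ x := fun x hx => List.rel_of_pairwise_cons hp.tail hx
      have hcnot : c ∉ d :: ds := by
        intro hmem
        rcases List.mem_cons.mp hmem with h | h
        · exact hdc (h.symm)
        · exact absurd (lt_of_lt_of_le hcd (hds c h)) (lt_irrefl c)
      have hcount0 : (d :: ds).count c = 0 := List.count_eq_zero.mpr hcnot
      rw [hstep, ih d 1 hp.tail, hcount0, Nat.add_zero]
      have herase : (d :: ds).toFinset.erase c = insert d ds.toFinset := by
        rw [List.toFinset_cons, Finset.erase_eq_of_notMem (by simpa using hcnot)]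
      rw [herase]
      rw [← Finset.add_sum_erase (insert d ds.toFinset)
            (fun e => contrib e ((d :: ds).count e)) (Finset.mem_insert_self d _),
          Finset.erase_insert_eq_erase]
      have h1 : (d :: ds).count d = 1 + ds.count d := by simp; omega
      rw [h1]
      have h2 : ∑ e ∈ ds.toFinset.erase d, contrib e ((d :: ds).count e)
          = ∑ e ∈ ds.toFinset.erase d, contrib e (ds.count e) := by
        apply Finset.sum_congr rfl
        intro e he
        have hne : e ≠ d := Finset.ne_of_mem_erase he
        simp [hne.symm]
      rw [h2]

-- peel the head off a Finset sum of contributions over a cons list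
theorem sum_over_cons (c : Char) (t : List Char) :
    ∑ e ∈ (c :: t).toFinset, contrib e ((c :: t).count e)
    = contrib c (1 + t.count c) + ∑ e ∈ t.toFinset.erase c, contrib e (t.count e) := by
  rw [List.toFinset_cons,
      ← Finset.add_sum_erase (insert c t.toFinset)
        (fun e => contrib e ((c :: t).count e)) (Finset.mem_insert_self c _),
      Finset.erase_insert_eq_erase]
  have h1 : (c :: t).count c = 1 + t.count c := by simp; omega
  rw [h1]
  congr 1
  apply Finset.sum_congr rfl
  intro e he
  have hne : e ≠ c := Finset.ne_of_mem_erase he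
  simp [hne.symm]

-- A's accumulating loop is the sum of contributions over the distinct chars
theorem foldl_if_count (s l : List Char) (a : Int) :
    l.foldl (fun suma cyfra =>
      let ile : Int := (s.count cyfra : Int)
      if ile > 1 then suma + ile * digitVal cyfra else suma) a
    = a + (l.map (fun c => contrib c (s.count c))).sum := by
  induction l generalizing a with
  | nil => simp
  | cons c l ih =>
    simp only [List.foldl_cons, List.map_cons, List.sum_cons, ih, contrib]
    have hc : ((s.count c : Int) > 1) ↔ 1 < s.count c := by exact_mod_cast Iff.rfl
    split_ifs with h h' h' <;> simp_all <;> ring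

theorem f_eq_f_alt (liczba : Int) : f liczba = f_alt liczba := by
  have key : ∀ s : List Char, (PySem.Set.ofList s).foldl
      (fun suma cyfra =>
        let ile : Int := (s.count cyfra : Int)
        if ile > 1 then suma + ile * digitVal cyfra else suma) 0
      = (match PySem.List.sorted s (fun x => x) false with
         | [] => 0
         | c :: t => fAltGo c 1 t) := by
    intro s
    rw [foldl_if_count, zero_add]
    rw [← List.sum_toFinset _ (PySem.Set.nodup_ofList s)]
    have hfs : (PySem.Set.ofList s).toFinset = s.toFinset := by
      ext x; simp [PySem.Set.mem_ofList]
    rw [hfs]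
    rcases ht : PySem.List.sorted s (fun x => x) false with _ | ⟨c, t⟩
    · have hs : s = [] :=
        (PySem.List.sorted_eq_nil_iff (xs := s) (key := fun x : Char => x) (rev := false)).mp ht
      simp [hs]
    · show _ = fAltGo c 1 t
      have hperm : (c :: t).Perm s := ht ▸ PySem.List.sorted_perm s (fun x => x) false
      have hpw : (c :: t).Pairwise (fun a b => a ≤ b) := by
        have := PySem.List.sorted_pairwise s (fun x : Char => x)
        rw [ht] at this; exact this
      rw [fAltGo_eq t c 1 hpw, ← sum_over_cons]
      rw [List.toFinset_eq_of_perm _ _ hperm]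
      apply Finset.sum_congr rfl
      intro e _
      rw [hperm.count_eq]
  exact key (PySem.Int.toChars liczba)

-- ===== VERDICT (by name: the statement is the Claim_ definition above) =====
theorem f_spec : Claim_equal_f := fun liczba _ => f_eq_f_alt liczba
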